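-- pv_equiv track=rewrite | github.com/HIT-cwh/xtuner | xtuner/_lite/patches/torch.py | get_chunk_size
-- ===== SOURCE A (Python) =====
-- import math
-- import math
--
-- def get_chunk_size(tensor_size, num_chunks):
--     total_size = tensor_size[0]
--     base_size = 128
--     ideal_chunk_size = math.ceil(total_size / num_chunks)
--     if ideal_chunk_size > base_size:
--         # 如果大于base_size，调整到base_size的倍数
--         chunk_size = math.ceil(ideal_chunk_size / base_size) * base_size
--     else:
--         # 如果小于base_size，找到最大的能整除base_size的数
--         factors = [1, 2, 4, 8, 16, 32, 64, 128]
--         chunk_size = next(size for size in factors if size >= ideal_chunk_size)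
--     return chunk_size
-- ===== SOURCE B (Python) =====
-- def get_chunk_size(tensor_size, num_chunks):
--     total_size = tensor_size[0]
--     ideal_chunk_size = -(-total_size // num_chunks)
--     if ideal_chunk_size > 128:
--         return (ideal_chunk_size + 127) // 128 * 128
--     return 1 << max(ideal_chunk_size - 1, 0).bit_length()
-- ===== Notes on version B (the rewrite author's own statement) =====
-- stated objective: simpler
-- what changed: Replaces the generator scan over the [1,2,...,128] factors list with a closed-form power-of-two via bit_length, and both float math.ceil divisions with integer ceiling division.
import Mathlib
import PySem

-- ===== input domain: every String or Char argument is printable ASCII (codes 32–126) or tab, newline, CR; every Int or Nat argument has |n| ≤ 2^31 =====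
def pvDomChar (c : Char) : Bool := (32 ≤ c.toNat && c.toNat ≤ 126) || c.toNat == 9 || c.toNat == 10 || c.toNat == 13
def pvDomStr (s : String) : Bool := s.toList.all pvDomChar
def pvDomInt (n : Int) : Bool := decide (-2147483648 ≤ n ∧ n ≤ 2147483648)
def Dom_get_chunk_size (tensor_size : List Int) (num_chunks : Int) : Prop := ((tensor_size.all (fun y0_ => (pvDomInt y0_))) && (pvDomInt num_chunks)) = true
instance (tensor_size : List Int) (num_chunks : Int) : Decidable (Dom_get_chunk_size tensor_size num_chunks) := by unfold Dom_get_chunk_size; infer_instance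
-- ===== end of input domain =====

-- B replaces A's linear scan of the factor list with a closed-form power-of-two
-- (bit_length shift) and the float ceilings with integer ceiling division (simpler; exact on Dom).

-- ===== PORT A =====
def get_chunk_size (tensor_size : List Int) (num_chunks : Int) : Int :=
  match PySem.List.pyGet? tensor_size 0 with
  | none => 0  -- IndexError on empty list: excluded by Pre_
  | some total_size =>
    let base_size : Int := 128
    -- math.ceil(total_size / num_chunks): exact integer ceiling on |int| ≤ 2^31 (float error < 1/|num_chunks|)
    let ideal_chunk_size := -(PySem.Int.floordiv (-total_size) num_chunks)
    if ideal_chunk_size > base_size then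
      -(PySem.Int.floordiv (-ideal_chunk_size) base_size) * base_size
    else
      -- next(size for size in factors if size >= ideal_chunk_size); always found since ideal ≤ 128
      (([1, 2, 4, 8, 16, 32, 64, 128] : List Int).find? (fun s => decide (ideal_chunk_size ≤ s))).getD 0

-- ===== PORT B =====
def get_chunk_size_alt (tensor_size : List Int) (num_chunks : Int) : Int :=
  match PySem.List.pyGet? tensor_size 0 with
  | none => 0  -- IndexError on empty list: excluded by Pre_
  | some total_size =>
    let ideal_chunk_size := -(PySem.Int.floordiv (-total_size) num_chunks)
    if ideal_chunk_size > 128 then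
      PySem.Int.floordiv (ideal_chunk_size + 127) 128 * 128
    else
      -- 1 << max(ideal_chunk_size - 1, 0).bit_length()
      2 ^ PySem.Int.bitLength (max (ideal_chunk_size - 1) 0)

-- ===== PRECONDITION & SPEC =====
-- Pre_ excludes exactly the inputs where Python A raises: empty list (IndexError) and num_chunks = 0 (ZeroDivisionError).
def Pre_get_chunk_size (tensor_size : List Int) (num_chunks : Int) : Prop :=
  tensor_size ≠ [] ∧ num_chunks ≠ 0
instance (tensor_size : List Int) (num_chunks : Int) : Decidable (Pre_get_chunk_size tensor_size num_chunks) := by unfold Pre_get_chunk_size; infer_instance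
def pvWitness_get_chunk_size : List Int × Int := ([1000], 3)

def Spec_get_chunk_size (tensor_size : List Int) (num_chunks : Int) (out : Int) : Prop := out = get_chunk_size_alt tensor_size num_chunks
instance (tensor_size : List Int) (num_chunks : Int) (out : Int) : Decidable (Spec_get_chunk_size tensor_size num_chunks out) := by unfold Spec_get_chunk_size; infer_instance

-- ===== CLAIM (what is proved, stated in full; the proofs are below) =====
def Claim_equal_get_chunk_size : Prop := ∀ (tensor_size : List Int) (num_chunks : Int), Dom_get_chunk_size tensor_size num_chunks → Pre_get_chunk_size tensor_size num_chunks → Spec_get_chunk_size tensor_size num_chunks (get_chunk_size tensor_size num_chunks)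

-- ===== LEMMAS AND PROOFS =====

-- Large branch: ceil(i/128) computed as -((-i)//128) (A) equals (i+127)//128 (B).
lemma big_branch_eq (i : Int) :
    -(PySem.Int.floordiv (-i) 128) = PySem.Int.floordiv (i + 127) 128 := by
  rw [PySem.Int.neg_floordiv_neg_eq_iff_of_pos (by norm_num)]
  have h := (PySem.Int.floordiv_eq_iff_of_pos (a := i + 127) (b := 128) (q := PySem.Int.floordiv (i + 127) 128) (by norm_num)).mp rfl
  constructor <;> nlinarith [h.1, h.2]

-- Small branch: the first factor ≥ i equals 2 ^ bit_length(max(i-1,0)) when i ≤ 128.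
lemma small_branch_eq (i : Int) (hi : i ≤ 128) :
    (([1, 2, 4, 8, 16, 32, 64, 128] : List Int).find? (fun s => decide (i ≤ s))).getD 0
      = 2 ^ PySem.Int.bitLength (max (i - 1) 0) := by
  by_cases h1 : i ≤ 1
  · have hm : max (i - 1) 0 = 0 := by omega
    have hd : decide (i ≤ (1 : Int)) = true := by simpa using h1
    simp [List.find?, hd, hm]
  · have h2 : 2 ≤ i := by omega
    interval_cases i <;> decide

-- ===== VERDICT (by name: the statement is the Claim_ definition above) =====
theorem get_chunk_size_spec : Claim_equal_get_chunk_size := by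
  intro tensor_size num_chunks _ _
  unfold Spec_get_chunk_size get_chunk_size get_chunk_size_alt
  cases PySem.List.pyGet? tensor_size 0 with
  | none => rfl
  | some total_size =>
    simp only []
    set i := -(PySem.Int.floordiv (-total_size) num_chunks) with hi
    by_cases h : i > 128
    · simp only [if_pos h]
      rw [big_branch_eq]
    · simp only [if_neg h]
      exact small_branch_eq i (by omega)
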